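-- pv_equiv track=rewrite | github.com/manwar/perlweeklychallenge-club | challenge-213/roger-bell-west/python/ch-1.py | funsort
-- ===== SOURCE A (Python) =====
-- def funsort(l0):
--   l = l0
--   l.sort()
--   a = []
--   b = []
--   for k in l:
--     if k % 2 == 0:
--       a.append(k)
--     else:
--       b.append(k)
--   a.extend(b)
--   return a
-- ===== SOURCE B (Python) =====
-- def funsort(l0):
--   # Partition first, then sort each group independently (A sorts the whole
--   # list first and then partitions). Note: A sorts l0 in place; B does not
--   # mutate its argument -- the equivalence claimed is about the return value.
--   evens = sorted(x for x in l0 if x % 2 == 0)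
--   odds = sorted(x for x in l0 if x % 2 != 0)
--   return evens + odds
-- ===== Notes on version B (the rewrite author's own statement) =====
-- stated objective: alternative
-- what changed: A sorts the whole list once and then partitions it with an append loop; B partitions first and sorts the even and odd groups independently, concatenating the two sorted groups (A mutates l0 in place via l0.sort(); B does not mutate its argument -- the claim is about the return value).
import Mathlib
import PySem

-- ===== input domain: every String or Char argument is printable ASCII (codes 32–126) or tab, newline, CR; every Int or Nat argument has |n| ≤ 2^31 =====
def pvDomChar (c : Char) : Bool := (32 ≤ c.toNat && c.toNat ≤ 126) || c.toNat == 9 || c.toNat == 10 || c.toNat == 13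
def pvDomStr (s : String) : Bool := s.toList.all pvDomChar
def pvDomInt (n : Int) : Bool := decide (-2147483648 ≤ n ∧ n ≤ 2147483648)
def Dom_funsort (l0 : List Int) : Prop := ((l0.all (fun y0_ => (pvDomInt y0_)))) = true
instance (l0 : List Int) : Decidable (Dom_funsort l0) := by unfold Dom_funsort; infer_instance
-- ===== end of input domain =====

-- B partitions first and sorts evens and odds separately, instead of A's sort-then-partition loop.
-- A mutates l0 in place (l0.sort()); B does not: the equivalence proved is about the RETURN value only.


-- ===== PORT A =====
-- l = l0; l.sort(); loop appending to a (evens) and b (odds); a.extend(b); return a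
def funsort (l0 : List Int) : List Int :=
  let l := PySem.List.sorted l0 (fun x => x)
  let ab := l.foldl
    (fun (s : List Int × List Int) k =>
      if PySem.Int.mod k 2 == 0 then (s.1 ++ [k], s.2) else (s.1, s.2 ++ [k]))
    ([], [])
  ab.1 ++ ab.2

-- ===== PORT B =====
def funsort_alt (l0 : List Int) : List Int :=
  let evens := PySem.List.sorted (l0.filter (fun x => PySem.Int.mod x 2 == 0)) (fun x => x)
  let odds := PySem.List.sorted (l0.filter (fun x => !(PySem.Int.mod x 2 == 0))) (fun x => x)
  evens ++ odds

-- ===== PRECONDITION & SPEC =====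
def Spec_funsort (l0 : List Int) (out : List Int) : Prop := out = funsort_alt l0
instance (l0 : List Int) (out : List Int) : Decidable (Spec_funsort l0 out) := by unfold Spec_funsort; infer_instance

-- ===== CLAIM (what is proved, stated in full; the proofs are below) =====
def Claim_equal_funsort : Prop := ∀ (l0 : List Int), Dom_funsort l0 → Spec_funsort l0 (funsort l0)

-- ===== LEMMAS AND PROOFS =====

-- A's partition loop over pair state (a, b) is the two filters appended to the accumulators.
theorem funsort_pairfold (l a b : List Int) :
    l.foldl
      (fun (s : List Int × List Int) k =>
        if PySem.Int.mod k 2 == 0 then (s.1 ++ [k], s.2) else (s.1, s.2 ++ [k]))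
      (a, b)
    = (a ++ l.filter (fun k => PySem.Int.mod k 2 == 0),
       b ++ l.filter (fun k => !(PySem.Int.mod k 2 == 0))) := by
  induction l generalizing a b with
  | nil => simp
  | cons x xs ih =>
    simp only [List.foldl_cons, List.filter_cons]
    by_cases h : (PySem.Int.mod x 2 == 0) = true <;>
      simp only [h, if_true, if_false, Bool.not_true, Bool.not_false, ih,
        Bool.false_eq_true, List.append_assoc, List.singleton_append]

-- sorting a filtered list = filtering the sorted list (id key)
theorem sorted_filter_comm (l0 : List Int) (q : Int → Bool) :
    PySem.List.sorted (l0.filter q) (fun x => x)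
    = (PySem.List.sorted l0 (fun x => x)).filter q := by
  apply PySem.List.sorted_id_eq_of_perm_of_pairwise
  · exact ((PySem.List.sorted_perm l0 (fun x => x) false).filter q)
  · exact ((PySem.List.sorted_pairwise l0 (fun x => x)).filter q)

-- ===== VERDICT (by name: the statement is the Claim_ definition above) =====
theorem funsort_spec : Claim_equal_funsort := by
  intro l0 _
  unfold Spec_funsort funsort funsort_alt
  simp only [funsort_pairfold, sorted_filter_comm, List.nil_append]
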